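-- pv_equiv track=rewrite | github.com/helderseixas/doutorado-ipe | lista_2_questao_1.py | extrair_palavras_com_exatamente_2_letras_iguais
-- ===== SOURCE A (Python) =====
-- def extrair_palavras_com_exatamente_2_letras_iguais(palavras_com_3_letras):
--     conjunto = []
--     for palavra in palavras_com_3_letras:
--         if palavra[0] == palavra[1] and palavra[0] != palavra[2]:
--             conjunto.append(palavra)
--         elif palavra[0] == palavra[2] and palavra[0] != palavra[1]:
--             conjunto.append(palavra)
--         elif palavra[1] == palavra[2] and palavra[1] != palavra[0]:
--             conjunto.append(palavra)
--     return conjunto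
-- ===== SOURCE B (Python) =====
-- def extrair_palavras_com_exatamente_2_letras_iguais(palavras_com_3_letras):
--     n = len(palavras_com_3_letras)
--     if n == 0:
--         return []
--     if n == 1:
--         p = palavras_com_3_letras[0]
--         pares_iguais = (p[0] == p[1]) + (p[0] == p[2]) + (p[1] == p[2])
--         return [p] if pares_iguais == 1 else []
--     meio = n // 2
--     return (extrair_palavras_com_exatamente_2_letras_iguais(palavras_com_3_letras[:meio])
--             + extrair_palavras_com_exatamente_2_letras_iguais(palavras_com_3_letras[meio:]))
-- ===== Notes on version B (the rewrite author's own statement) =====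
-- stated objective: alternative
-- what changed: Replaces the single append-loop with a three-branch pairwise-equality cascade by a divide-and-conquer recursion that splits the list in half, decides a singleton by testing that the arithmetic sum of the three pairwise-equality booleans is exactly 1, and concatenates the two halves' results.
import Mathlib
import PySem

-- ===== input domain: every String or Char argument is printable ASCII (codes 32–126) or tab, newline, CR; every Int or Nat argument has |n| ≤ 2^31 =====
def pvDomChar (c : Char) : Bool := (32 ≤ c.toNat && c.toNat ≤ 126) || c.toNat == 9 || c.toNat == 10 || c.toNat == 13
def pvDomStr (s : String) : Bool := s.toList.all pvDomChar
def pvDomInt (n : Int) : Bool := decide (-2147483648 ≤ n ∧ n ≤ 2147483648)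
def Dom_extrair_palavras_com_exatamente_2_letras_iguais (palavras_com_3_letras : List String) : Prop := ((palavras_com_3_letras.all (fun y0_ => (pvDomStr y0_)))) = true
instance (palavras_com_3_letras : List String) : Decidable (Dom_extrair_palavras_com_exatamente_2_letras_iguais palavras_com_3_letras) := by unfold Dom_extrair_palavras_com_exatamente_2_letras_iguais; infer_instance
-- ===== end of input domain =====

-- B replaces A's append-loop with its three-branch equality cascade by a divide-and-conquer
-- recursion (split in half, concatenate) whose singleton test sums the three pairwise-equality
-- booleans and compares with 1: an alternative of similar cost.

-- ===== PORT A =====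
def extrair_palavras_com_exatamente_2_letras_iguais (palavras_com_3_letras : List String) : List String :=
  palavras_com_3_letras.foldl (fun conjunto palavra =>
    if (PySem.Str.pyGet? palavra 0 == PySem.Str.pyGet? palavra 1) &&
       !(PySem.Str.pyGet? palavra 0 == PySem.Str.pyGet? palavra 2) then conjunto ++ [palavra]
    else if (PySem.Str.pyGet? palavra 0 == PySem.Str.pyGet? palavra 2) &&
            !(PySem.Str.pyGet? palavra 0 == PySem.Str.pyGet? palavra 1) then conjunto ++ [palavra]
    else if (PySem.Str.pyGet? palavra 1 == PySem.Str.pyGet? palavra 2) &&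
            !(PySem.Str.pyGet? palavra 1 == PySem.Str.pyGet? palavra 0) then conjunto ++ [palavra]
    else conjunto) []

-- ===== PORT B =====
-- Source B's singleton test: (p[0]==p[1]) + (p[0]==p[2]) + (p[1]==p[2]) == 1 (Python bools sum as ints).
def pvParesIguais (p : String) : Int :=
  (if PySem.Str.pyGet? p 0 == PySem.Str.pyGet? p 1 then 1 else 0) +
  (if PySem.Str.pyGet? p 0 == PySem.Str.pyGet? p 2 then 1 else 0) +
  (if PySem.Str.pyGet? p 1 == PySem.Str.pyGet? p 2 then 1 else 0)

-- xs[:meio] / xs[meio:] with 0 ≤ meio are exactly List.take / List.drop (PySem slice_to/slice_from).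
def extrair_palavras_com_exatamente_2_letras_iguais_alt (palavras_com_3_letras : List String) : List String :=
  if palavras_com_3_letras.length == 0 then []
  else if palavras_com_3_letras.length == 1 then
    match palavras_com_3_letras with
    | p :: _ => if pvParesIguais p == 1 then [p] else []
    | [] => []
  else
    extrair_palavras_com_exatamente_2_letras_iguais_alt
        (palavras_com_3_letras.take (palavras_com_3_letras.length / 2)) ++
    extrair_palavras_com_exatamente_2_letras_iguais_alt
        (palavras_com_3_letras.drop (palavras_com_3_letras.length / 2))
termination_by palavras_com_3_letras.length
decreasing_by all_goals (simp only [List.length_take, List.length_drop, beq_iff_eq] at *; omega)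

-- ===== PRECONDITION & SPEC =====
-- A (and B) index positions 0,1,2 of every word: both raise IndexError on a word
-- shorter than 3 characters, so Pre_ requires every word to have length ≥ 3.
def Pre_extrair_palavras_com_exatamente_2_letras_iguais (palavras_com_3_letras : List String) : Prop :=
  ∀ p ∈ palavras_com_3_letras, 3 ≤ p.toList.length
instance (palavras_com_3_letras : List String) : Decidable (Pre_extrair_palavras_com_exatamente_2_letras_iguais palavras_com_3_letras) := by unfold Pre_extrair_palavras_com_exatamente_2_letras_iguais; infer_instance
def pvWitness_extrair_palavras_com_exatamente_2_letras_iguais : List String := ["aab", "abc", "aaa", "aba"]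

def Spec_extrair_palavras_com_exatamente_2_letras_iguais (palavras_com_3_letras : List String) (out : List String) : Prop := out = extrair_palavras_com_exatamente_2_letras_iguais_alt palavras_com_3_letras
instance (palavras_com_3_letras : List String) (out : List String) : Decidable (Spec_extrair_palavras_com_exatamente_2_letras_iguais palavras_com_3_letras out) := by unfold Spec_extrair_palavras_com_exatamente_2_letras_iguais; infer_instance

-- ===== CLAIM (what is proved, stated in full; the proofs are below) =====
def Claim_equal_extrair_palavras_com_exatamente_2_letras_iguais : Prop := ∀ (palavras_com_3_letras : List String), Dom_extrair_palavras_com_exatamente_2_letras_iguais palavras_com_3_letras → Pre_extrair_palavras_com_exatamente_2_letras_iguais palavras_com_3_letras → Spec_extrair_palavras_com_exatamente_2_letras_iguais palavras_com_3_letras (extrair_palavras_com_exatamente_2_letras_iguais palavras_com_3_letras)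

-- ===== LEMMAS AND PROOFS =====

-- Three characters contain exactly one duplicated pair (A's cascade condition)
-- iff exactly one of the three pairwise equalities holds (B's boolean sum is 1).
theorem pv_three (a b c : Char) :
    ((a == b) && !(a == c) || ((a == c) && !(a == b) || (b == c) && !(b == a)))
    = (((if a == b then (1:Int) else 0) + (if a == c then 1 else 0) +
        (if b == c then 1 else 0)) == 1) := by
  by_cases hab : a = b <;> by_cases hac : a = c <;> by_cases hbc : b = c <;>
    simp_all [Ne.symm]

-- On a word of length ≥ 3, A's branch condition coincides with B's test.
theorem pv_cond_eq (p : String) (h : 3 ≤ p.toList.length) :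
    ((PySem.Str.pyGet? p 0 == PySem.Str.pyGet? p 1) &&
       !(PySem.Str.pyGet? p 0 == PySem.Str.pyGet? p 2) ||
     ((PySem.Str.pyGet? p 0 == PySem.Str.pyGet? p 2) &&
       !(PySem.Str.pyGet? p 0 == PySem.Str.pyGet? p 1) ||
      (PySem.Str.pyGet? p 1 == PySem.Str.pyGet? p 2) &&
       !(PySem.Str.pyGet? p 1 == PySem.Str.pyGet? p 0)))
    = (pvParesIguais p == 1) := by
  rcases hl : p.toList with _ | ⟨a, _ | ⟨b, _ | ⟨c, t⟩⟩⟩ <;> simp [hl] at h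
  have g0 : PySem.Str.pyGet? p 0 = some a := by
    rw [show ((0 : Int)) = ((0 : Nat) : Int) from rfl, PySem.Str.pyGet?_natCast, hl]; rfl
  have g1 : PySem.Str.pyGet? p 1 = some b := by
    rw [show ((1 : Int)) = ((1 : Nat) : Int) from rfl, PySem.Str.pyGet?_natCast, hl]; rfl
  have g2 : PySem.Str.pyGet? p 2 = some c := by
    rw [show ((2 : Int)) = ((2 : Nat) : Int) from rfl, PySem.Str.pyGet?_natCast, hl]; rfl
  unfold pvParesIguais
  rw [g0, g1, g2]
  simpa using pv_three a b c

-- A's if-cascade body as a single conditional append of the cascade condition.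
theorem pv_body_eq (cond : String → Bool) (p : String)
    (hx : ((PySem.Str.pyGet? p 0 == PySem.Str.pyGet? p 1) &&
       !(PySem.Str.pyGet? p 0 == PySem.Str.pyGet? p 2) ||
     ((PySem.Str.pyGet? p 0 == PySem.Str.pyGet? p 2) &&
       !(PySem.Str.pyGet? p 0 == PySem.Str.pyGet? p 1) ||
      (PySem.Str.pyGet? p 1 == PySem.Str.pyGet? p 2) &&
       !(PySem.Str.pyGet? p 1 == PySem.Str.pyGet? p 0))) = cond p)
    (acc : List String) :
    (if (PySem.Str.pyGet? p 0 == PySem.Str.pyGet? p 1) &&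
        !(PySem.Str.pyGet? p 0 == PySem.Str.pyGet? p 2) then acc ++ [p]
     else if (PySem.Str.pyGet? p 0 == PySem.Str.pyGet? p 2) &&
             !(PySem.Str.pyGet? p 0 == PySem.Str.pyGet? p 1) then acc ++ [p]
     else if (PySem.Str.pyGet? p 1 == PySem.Str.pyGet? p 2) &&
             !(PySem.Str.pyGet? p 1 == PySem.Str.pyGet? p 0) then acc ++ [p]
     else acc)
    = (if cond p then acc ++ [p] else acc) := by
  rw [← hx]
  rcases h1 : ((PySem.Str.pyGet? p 0 == PySem.Str.pyGet? p 1) &&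
      !(PySem.Str.pyGet? p 0 == PySem.Str.pyGet? p 2)) with _ | _ <;>
    rcases h2 : ((PySem.Str.pyGet? p 0 == PySem.Str.pyGet? p 2) &&
      !(PySem.Str.pyGet? p 0 == PySem.Str.pyGet? p 1)) with _ | _ <;>
    rcases h3 : ((PySem.Str.pyGet? p 1 == PySem.Str.pyGet? p 2) &&
      !(PySem.Str.pyGet? p 1 == PySem.Str.pyGet? p 0)) with _ | _ <;>
    simp_all

-- B's divide-and-conquer recursion computes the filter by B's singleton test.
theorem pv_alt_eq_filter (xs : List String) :
    extrair_palavras_com_exatamente_2_letras_iguais_alt xs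
    = xs.filter (fun p => pvParesIguais p == 1) := by
  unfold extrair_palavras_com_exatamente_2_letras_iguais_alt
  split_ifs with h0 h1
  · have : xs = [] := List.length_eq_zero_iff.mp (by simpa using h0)
    simp [this]
  · obtain ⟨p, rfl⟩ : ∃ p, xs = [p] := List.length_eq_one_iff.mp (by simpa using h1)
    cases h : pvParesIguais p == 1 <;> simp [List.filter, h]
  · rw [pv_alt_eq_filter (xs.take (xs.length / 2)),
        pv_alt_eq_filter (xs.drop (xs.length / 2)),
        ← List.filter_append, List.take_append_drop]
termination_by xs.length
decreasing_by all_goals (simp only [List.length_take, List.length_drop, beq_iff_eq] at *; omega)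

-- ===== VERDICT (by name: the statement is the Claim_ definition above) =====
set_option maxHeartbeats 1000000 in
theorem extrair_palavras_com_exatamente_2_letras_iguais_spec : Claim_equal_extrair_palavras_com_exatamente_2_letras_iguais := by
  intro xs _hdom hpre
  unfold Spec_extrair_palavras_com_exatamente_2_letras_iguais
  unfold extrair_palavras_com_exatamente_2_letras_iguais
  rw [pv_alt_eq_filter]
  have h1 := PySem.List.foldl_congr_mem' (l := xs) (init := ([] : List String))
    (f := fun conjunto palavra =>
      if (PySem.Str.pyGet? palavra 0 == PySem.Str.pyGet? palavra 1) &&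
         !(PySem.Str.pyGet? palavra 0 == PySem.Str.pyGet? palavra 2) then conjunto ++ [palavra]
      else if (PySem.Str.pyGet? palavra 0 == PySem.Str.pyGet? palavra 2) &&
              !(PySem.Str.pyGet? palavra 0 == PySem.Str.pyGet? palavra 1) then conjunto ++ [palavra]
      else if (PySem.Str.pyGet? palavra 1 == PySem.Str.pyGet? palavra 2) &&
              !(PySem.Str.pyGet? palavra 1 == PySem.Str.pyGet? palavra 0) then conjunto ++ [palavra]
      else conjunto)
    (g := fun acc p => if pvParesIguais p == 1 then acc ++ [p] else acc)
    (fun p hp acc => by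
      exact pv_body_eq (fun q => pvParesIguais q == 1) p (pv_cond_eq p (hpre p hp)) acc)
  rw [h1, PySem.List.foldl_append_if_eq_filter]
  simp
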